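-- pv_equiv track=rewrite | github.com/dogcomplex/ComfyUI-LOKI | filter_nodes.py | parse_node_block
-- ===== SOURCE A (Python) =====
-- from typing import List, Dict, Tuple
--
-- def parse_node_metadata(text: str) -> dict:
--     """Extract metadata from node description"""
--     metadata = {}
--     lines = text.split('\n')
--
--     for line in lines:
--         if '**Author:**' in line:
--             metadata['author'] = line.split('**Author:**')[1].strip()
--         elif '**Repository:**' in line:
--             metadata['repository'] = line.split('**Repository:**')[1].strip()
--         elif '**Install Type:**' in line:
--             metadata['install_type'] = line.split('**Install Type:**')[1].strip()
--
--     return metadata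
--
-- def parse_node_block(text: str) -> List[Tuple[str, str, dict]]:
--     """Parse markdown text into list of (node_name, description, metadata) tuples"""
--     nodes = []
--     current_node = ""
--     current_desc = []
--
--     for line in text.split('\n'):
--         if line.startswith('### '):
--             if current_node:
--                 desc_text = '\n'.join(current_desc)
--                 metadata = parse_node_metadata(desc_text)
--                 nodes.append((current_node, desc_text, metadata))
--             current_node = line[4:].strip()
--             current_desc = []
--         elif current_node:
--             current_desc.append(line)
--
--     if current_node:
--         desc_text = '\n'.join(current_desc)
--         metadata = parse_node_metadata(desc_text)
--         nodes.append((current_node, desc_text, metadata))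
--
--     return nodes
-- ===== SOURCE B (Python) =====
-- _MARKERS = [("author", "**Author:**"),
--             ("repository", "**Repository:**"),
--             ("install_type", "**Install Type:**")]
--
-- def parse_node_metadata(text):
--     """Table-driven metadata extraction."""
--     metadata = {}
--     for line in text.split('\n'):
--         for key, marker in _MARKERS:
--             if marker in line:
--                 metadata[key] = line.split(marker)[1].strip()
--                 break
--     return metadata
--
-- def parse_node_block(text):
--     """Chunk the lines into (header, body) sections first, then filter/map."""
--     lines = text.split('\n')
--     # drop the preamble before the first header
--     while lines and not lines[0].startswith('### '):
--         lines.pop(0)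
--     sections = []
--     while lines:
--         header = lines.pop(0)
--         body = []
--         while lines and not lines[0].startswith('### '):
--             body.append(lines.pop(0))
--         sections.append((header[4:].strip(), '\n'.join(body)))
--     return [(n, d, parse_node_metadata(d)) for n, d in sections if n]
-- ===== Notes on version B (the rewrite author's own statement) =====
-- stated objective: simpler
-- what changed: Replaces A's incremental accumulator state machine (current_node/current_desc carried across the line loop plus a duplicated end-of-loop flush) by a two-phase pass: chunk the lines into (header, body) sections first, then a single filter/map builds the result, with the metadata extractor driven by a marker table instead of an elif chain.
import Mathlib
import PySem

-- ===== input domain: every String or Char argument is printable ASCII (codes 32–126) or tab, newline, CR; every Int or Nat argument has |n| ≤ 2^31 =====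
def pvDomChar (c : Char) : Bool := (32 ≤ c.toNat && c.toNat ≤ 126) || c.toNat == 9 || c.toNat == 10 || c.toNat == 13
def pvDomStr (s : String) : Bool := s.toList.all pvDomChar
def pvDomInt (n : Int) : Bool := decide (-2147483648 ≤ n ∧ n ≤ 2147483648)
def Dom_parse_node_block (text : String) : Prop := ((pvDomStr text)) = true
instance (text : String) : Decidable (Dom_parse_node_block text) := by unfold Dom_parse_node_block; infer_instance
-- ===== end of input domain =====

-- B replaces A's one-pass accumulator state machine by a chunk-into-sections pass followed by a
-- filter/map, and drives the metadata extraction from a marker table; simpler, same cost.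

-- text.split('\n') ('\n' is non-empty, so split? never returns none; exact)
def pvLines (text : String) : List String := (PySem.Str.split? text "\n").getD []

-- ===== PORT A =====

-- one iteration of parse_node_metadata's loop body (the elif chain)
def pnmStepA (metadata : PySem.Dict String String) (line : String) : PySem.Dict String String :=
  if PySem.Str.isIn "**Author:**" line then
    metadata.insert "author" (PySem.Str.strip (((PySem.Str.split? line "**Author:**").getD []).getD 1 ""))
  else if PySem.Str.isIn "**Repository:**" line then
    metadata.insert "repository" (PySem.Str.strip (((PySem.Str.split? line "**Repository:**").getD []).getD 1 ""))
  else if PySem.Str.isIn "**Install Type:**" line then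
    metadata.insert "install_type" (PySem.Str.strip (((PySem.Str.split? line "**Install Type:**").getD []).getD 1 ""))
  else metadata

def parse_node_metadata (text : String) : List (String × String) :=
  ((pvLines text).foldl pnmStepA PySem.Dict.empty).items

-- the loop body of parse_node_block: state = (nodes, current_node, current_desc)
def pnbStepA (st : List (String × String × List (String × String)) × String × List String)
    (line : String) : List (String × String × List (String × String)) × String × List String :=
  let (nodes, cur, desc) := st
  if PySem.Str.startswith line "### " then
    let nodes' :=
      if cur = "" then nodes
      else
        let dt := PySem.Str.join "\n" desc
        nodes ++ [(cur, dt, parse_node_metadata dt)]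
    (nodes', PySem.Str.strip (PySem.Str.slice line (some 4) none), [])
  else if cur = "" then (nodes, cur, desc)
  else (nodes, cur, desc ++ [line])

-- the post-loop 'if current_node:' flush
def pnbFinish (st : List (String × String × List (String × String)) × String × List String) :
    List (String × String × List (String × String)) :=
  let (nodes, cur, desc) := st
  if cur = "" then nodes
  else
    let dt := PySem.Str.join "\n" desc
    nodes ++ [(cur, dt, parse_node_metadata dt)]

def parse_node_block (text : String) : List (String × String × (List (String × String))) :=
  pnbFinish ((pvLines text).foldl pnbStepA ([], "", []))

-- ===== PORT B =====

def pvMarkers : List (String × String) :=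
  [("author", "**Author:**"), ("repository", "**Repository:**"), ("install_type", "**Install Type:**")]

-- B's inner 'for key, marker in _MARKERS: … break' loop
def pnmTryB : List (String × String) → PySem.Dict String String → String → PySem.Dict String String
  | [], metadata, _ => metadata
  | (key, marker) :: ms, metadata, line =>
    if PySem.Str.isIn marker line then
      metadata.insert key (PySem.Str.strip (((PySem.Str.split? line marker).getD []).getD 1 ""))
    else pnmTryB ms metadata line

def parse_node_metadata_alt (text : String) : List (String × String) :=
  ((pvLines text).foldl (fun md line => pnmTryB pvMarkers md line) PySem.Dict.empty).items

def pvIsHeader (line : String) : Bool := PySem.Str.startswith line "### "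

-- chunk the line list into (name, body-text) sections, dropping any preamble
def pvSections : List String → List (String × String)
  | [] => []
  | l :: rest =>
    if pvIsHeader l then
      (PySem.Str.strip (PySem.Str.slice l (some 4) none),
       PySem.Str.join "\n" (rest.takeWhile (fun x => !pvIsHeader x)))
        :: pvSections (rest.dropWhile (fun x => !pvIsHeader x))
    else pvSections rest
termination_by ls => ls.length
decreasing_by
  · exact Nat.lt_succ_of_le (List.length_dropWhile_le _ _)
  · simp

def parse_node_block_alt (text : String) : List (String × String × (List (String × String))) :=
  (pvSections (pvLines text)).filterMap
    (fun s => if s.1 ≠ "" then some (s.1, s.2, parse_node_metadata_alt s.2) else none)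

-- ===== PRECONDITION & SPEC =====
def Spec_parse_node_block (text : String) (out : List (String × String × (List (String × String)))) : Prop := out = parse_node_block_alt text
instance (text : String) (out : List (String × String × (List (String × String)))) : Decidable (Spec_parse_node_block text out) := by unfold Spec_parse_node_block; infer_instance

-- ===== CLAIM (what is proved, stated in full; the proofs are below) =====
def Claim_equal_parse_node_block : Prop := ∀ (text : String), Dom_parse_node_block text → Spec_parse_node_block text (parse_node_block text)

-- ===== LEMMAS AND PROOFS =====

theorem pnm_eq (text : String) : parse_node_metadata_alt text = parse_node_metadata text := by
  have h : (fun md line => pnmTryB pvMarkers md line) = pnmStepA := by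
    funext md line
    simp [pvMarkers, pnmTryB, pnmStepA]
  unfold parse_node_metadata_alt parse_node_metadata
  rw [h]

def pvConv (ss : List (String × String)) : List (String × String × (List (String × String))) :=
  ss.filterMap (fun s => if s.1 ≠ "" then some (s.1, s.2, parse_node_metadata s.2) else none)

theorem pvSections_dropWhile (ls : List String) :
    pvSections (ls.dropWhile (fun x => !pvIsHeader x)) = pvSections ls := by
  induction ls with
  | nil => rfl
  | cons l rest ih =>
    by_cases h : pvIsHeader l = true
    · simp [h]
    · simp only [Bool.not_eq_true] at h
      simp only [List.dropWhile_cons]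
      simp [h, pvSections, ih]

theorem pnb_main (ls : List String) : ∀ (nodes : List (String × String × (List (String × String))))
    (cur : String) (desc : List String),
    pnbFinish (ls.foldl pnbStepA (nodes, cur, desc)) =
      if cur = "" then nodes ++ pvConv (pvSections ls)
      else
        nodes ++ [(cur, PySem.Str.join "\n" (desc ++ ls.takeWhile (fun x => !pvIsHeader x)),
          parse_node_metadata (PySem.Str.join "\n" (desc ++ ls.takeWhile (fun x => !pvIsHeader x))))]
          ++ pvConv (pvSections (ls.dropWhile (fun x => !pvIsHeader x))) := by
  induction ls with
  | nil =>
    intro nodes cur desc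
    by_cases h : cur = "" <;> simp [pnbFinish, h, pvSections, pvConv]
  | cons l rest ih =>
    intro nodes cur desc
    by_cases hl : pvIsHeader l = true
    · have hl' : PySem.Str.startswith l "### " = true := by simpa [pvIsHeader] using hl
      have hstep : ∀ n, (l :: rest).foldl pnbStepA (n, cur, desc) =
        rest.foldl pnbStepA
          ((if cur = "" then n
            else n ++ [(cur, PySem.Str.join "\n" desc,
              parse_node_metadata (PySem.Str.join "\n" desc))]),
           PySem.Str.strip (PySem.Str.slice l (some 4) none), []) := by
        intro n
        simp only [List.foldl_cons, pnbStepA, hl', if_true]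
      by_cases hn : PySem.Str.strip (PySem.Str.slice l (some 4) none) = ""
      · by_cases hc : cur = "" <;>
        · rw [hstep, ih]
          simp [hc, hn, pvSections, hl, pvConv, pvSections_dropWhile]
      · by_cases hc : cur = "" <;>
        · rw [hstep, ih]
          simp [hc, hn, pvSections, hl, pvConv]
    · have hl' : PySem.Str.startswith l "### " = false := by
        simpa [pvIsHeader] using hl
      by_cases hc : cur = ""
      · have hstep : (l :: rest).foldl pnbStepA (nodes, cur, desc) =
            rest.foldl pnbStepA (nodes, cur, desc) := by
          simp only [List.foldl_cons, pnbStepA, hl', Bool.false_eq_true, if_false, hc, if_true]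
        rw [hstep, ih]
        simp [hc, pvSections, hl]
      · have hstep : (l :: rest).foldl pnbStepA (nodes, cur, desc) =
            rest.foldl pnbStepA (nodes, cur, desc ++ [l]) := by
          simp only [List.foldl_cons, pnbStepA, hl', Bool.false_eq_true, if_false, hc]
        rw [hstep, ih]
        simp [hc, hl]

-- ===== VERDICT (by name: the statement is the Claim_ definition above) =====
theorem parse_node_block_spec : Claim_equal_parse_node_block := by
  intro text _
  unfold Spec_parse_node_block parse_node_block parse_node_block_alt
  rw [pnb_main]
  simp only [List.nil_append, pvConv]
  exact List.filterMap_congr (fun s _ => by by_cases h : s.1 = "" <;> simp [h, pnm_eq])
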